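-- pv_equiv track=rewrite | github.com/maulanaakbardj/TechTitansQ | countsentences.py | countSentences
-- ===== SOURCE A (Python) =====
-- from collections import defaultdict
--
-- def countSentences(wordSet, sentences):
--     # Write your code here
--     dic = defaultdict(int)
--     for s in wordSet:
-- 		# dictionary key can't be list, so we sorted it and change it to string
--         s = ''.join(sorted(s))
--         dic[s] += 1
--
--     res =[]
--
--     for sent  in sentences:
--         words = sent.split(' ')
--         count = 1
--         for word in words:
--             k = ''.join(sorted(word))
--             if k in dic:
--                 count *= dic[k]
--         res.append(count)
--
--     return res
-- ===== SOURCE B (Python) =====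
-- def countSentences(wordSet, sentences):
--     # sort all anagram signatures once; per word, binary-search the equal run's
--     # boundaries in the sorted list and take its length as the match count
--     sigs = sorted(''.join(sorted(w)) for w in wordSet)
--
--     def search(k, strict):
--         # first index whose entry is not < k (strict) / not <= k (non-strict)
--         lo, hi = 0, len(sigs)
--         while lo < hi:
--             mid = (lo + hi) // 2
--             if sigs[mid] < k or (not strict and sigs[mid] == k):
--                 lo = mid + 1
--             else:
--                 hi = mid
--         return lo
--
--     res = []
--     for sent in sentences:
--         prod = 1
--         for word in sent.split(' '):
--             k = ''.join(sorted(word))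
--             m = search(k, False) - search(k, True)
--             if m > 0:
--                 prod *= m
--         res.append(prod)
--     return res
-- ===== Notes on version B (the rewrite author's own statement) =====
-- stated objective: alternative
-- what changed: B replaces A's hash-counter dictionary by sort + binary search: all wordSet signatures are sorted once and each word's match count is the length of its equal run, obtained as the difference of two hand-written binary searches (bisect_right minus bisect_left).
import Mathlib
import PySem

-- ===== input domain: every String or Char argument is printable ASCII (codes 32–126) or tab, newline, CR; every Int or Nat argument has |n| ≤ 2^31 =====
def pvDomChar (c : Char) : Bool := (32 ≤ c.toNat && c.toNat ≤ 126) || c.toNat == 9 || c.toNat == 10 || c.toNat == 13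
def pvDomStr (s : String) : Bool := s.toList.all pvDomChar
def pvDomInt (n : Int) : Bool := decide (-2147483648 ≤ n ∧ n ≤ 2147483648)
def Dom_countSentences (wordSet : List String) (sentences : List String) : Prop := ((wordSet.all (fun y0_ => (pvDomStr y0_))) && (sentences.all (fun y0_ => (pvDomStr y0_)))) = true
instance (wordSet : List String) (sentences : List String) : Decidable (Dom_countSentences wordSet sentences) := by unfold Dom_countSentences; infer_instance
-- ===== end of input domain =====

-- B replaces A's hash-counter dictionary by sort + binary search: the wordSet signatures are
-- sorted once and each word's match count is read off as the length of its equal run, found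
-- by two hand-written binary searches (alternative decomposition, same return value).

-- ===== PORT A =====
-- ''.join(sorted(s)) : the sorted-character signature as a String (dict key in A)
def pySortStr (s : String) : String :=
  String.ofList (PySem.List.sorted s.toList (fun c => c) false)

def countSentences (wordSet : List String) (sentences : List String) : List Int :=
  let dic : PySem.Dict String Int :=
    wordSet.foldl (fun d s => d.modify (pySortStr s) 0 (· + 1)) PySem.Dict.empty
  sentences.foldl (fun res sent =>
    let words := (PySem.Str.split? sent " ").getD []   -- sep " " ≠ "": split? is some here
    let count := words.foldl (fun count word =>
      let k := pySortStr word
      if dic.contains k then count * dic.getD k 0 else count) 1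
    res ++ [count]) []

-- ===== PORT B =====
-- ''.join(sorted(w)) : B's sorted-character signature
def pySig (s : String) : String :=
  String.ofList (PySem.List.sorted s.toList (fun c => c) false)

-- B's 'while lo < hi' binary-search loop; sigs[mid] is always in range on B's calls
def bsLoop (sigs : List String) (k : String) (strict : Bool) (lo hi : Nat) : Nat :=
  if h : lo < hi then
    let mid := (lo + hi) / 2
    if decide (sigs.getD mid "" < k) || (!strict && (sigs.getD mid "" == k)) then
      bsLoop sigs k strict (mid + 1) hi
    else
      bsLoop sigs k strict lo mid
  else lo
termination_by hi - lo
decreasing_by all_goals omega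

-- B's 'search(k, strict)' helper: lo, hi = 0, len(sigs); return lo
def bsearch (sigs : List String) (k : String) (strict : Bool) : Nat :=
  bsLoop sigs k strict 0 sigs.length

def countSentences_alt (wordSet : List String) (sentences : List String) : List Int :=
  let sigs := PySem.List.sorted (wordSet.map pySig) (fun s => s) false
  sentences.foldl (fun res sent =>
    let prod := ((PySem.Str.split? sent " ").getD []).foldl (fun prod word =>
      let k := pySig word
      let m : Int := (bsearch sigs k false : Int) - (bsearch sigs k true : Int)
      if 0 < m then prod * m else prod) 1
    res ++ [prod]) []

-- ===== PRECONDITION & SPEC =====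
def Spec_countSentences (wordSet : List String) (sentences : List String) (out : List Int) : Prop := out = countSentences_alt wordSet sentences
instance (wordSet : List String) (sentences : List String) (out : List Int) : Decidable (Spec_countSentences wordSet sentences out) := by unfold Spec_countSentences; infer_instance

-- ===== CLAIM (what is proved, stated in full; the proofs are below) =====
def Claim_equal_countSentences : Prop := ∀ (wordSet : List String) (sentences : List String), Dom_countSentences wordSet sentences → Spec_countSentences wordSet sentences (countSentences wordSet sentences)

-- ===== LEMMAS AND PROOFS =====

lemma pySig_eq_pySortStr (s : String) : pySig s = pySortStr s := rfl

-- A's dict, built by the modify loop, is Counter of the mapped signatures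
lemma dict_eq_counter (wordSet : List String) :
    wordSet.foldl (fun d s => d.modify (pySortStr s) 0 (· + 1))
        (PySem.Dict.empty : PySem.Dict String Int)
      = PySem.Dict.counter (wordSet.map pySig) := by
  rw [← List.foldl_map (f := pySortStr) (g := fun (d : PySem.Dict String Int) x => d.modify x 0 (· + 1))]
  rfl

-- the binary-search loop keeps its boundary invariant: everything left of lo satisfies p,
-- everything from hi on fails p, and the result inherits both boundary facts
lemma bsLoop_inv (l : List String) (k : String) (strict : Bool) (p : String → Bool)
    (hp : ∀ x, (decide (x < k) || (!strict && (x == k))) = p x) :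
    ∀ (n lo hi : Nat), hi - lo ≤ n → lo ≤ hi → hi ≤ l.length →
    (lo = 0 ∨ ∃ h : lo - 1 < l.length, p l[lo-1] = true) →
    (hi = l.length ∨ ∃ h : hi < l.length, p l[hi] = false) →
    lo ≤ bsLoop l k strict lo hi ∧ bsLoop l k strict lo hi ≤ hi ∧
    (bsLoop l k strict lo hi = 0 ∨ ∃ h : bsLoop l k strict lo hi - 1 < l.length, p l[bsLoop l k strict lo hi - 1] = true) ∧
    (bsLoop l k strict lo hi = l.length ∨ ∃ h : bsLoop l k strict lo hi < l.length, p l[bsLoop l k strict lo hi] = false) := by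
  intro n
  induction n with
  | zero =>
    intro lo hi h0 h1 h2 hlo hhi
    have he : lo = hi := by omega
    subst he
    rw [bsLoop]
    simp only [lt_irrefl, dite_false]
    exact ⟨le_rfl, le_rfl, hlo, hhi⟩
  | succ n ih =>
    intro lo hi h0 h1 h2 hlo hhi
    by_cases hlh : lo < hi
    · rw [bsLoop]
      simp only [hlh, dite_true]
      have hmlt : (lo + hi) / 2 < hi := by omega
      have hmge : lo ≤ (lo + hi) / 2 := by omega
      have hmlen : (lo + hi) / 2 < l.length := by omega
      have hget : l.getD ((lo + hi) / 2) "" = l[(lo + hi) / 2] :=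
        List.getD_eq_getElem l "" hmlen
      by_cases hpm : p l[(lo + hi) / 2] = true
      · have hc : (decide (l.getD ((lo + hi) / 2) "" < k) || (!strict && (l.getD ((lo + hi) / 2) "" == k))) = true := by
          rw [hget, hp]; exact hpm
        rw [if_pos hc]
        have := ih ((lo + hi) / 2 + 1) hi (by omega) (by omega) h2
          (Or.inr ⟨by simpa using hmlen, by simpa using hpm⟩) hhi
        exact ⟨le_trans (by omega) this.1, this.2.1, this.2.2.1, this.2.2.2⟩
      · have hpf : p l[(lo + hi) / 2] = false := by
          cases hq : p l[(lo + hi) / 2] with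
          | false => rfl
          | true => exact absurd hq hpm
        have hc : ¬ ((decide (l.getD ((lo + hi) / 2) "" < k) || (!strict && (l.getD ((lo + hi) / 2) "" == k))) = true) := by
          rw [hget, hp]; simp [hpf]
        rw [if_neg hc]
        have := ih lo ((lo + hi) / 2) (by omega) (by omega) (by omega) hlo
          (Or.inr ⟨hmlen, hpf⟩)
        exact ⟨this.1, le_trans this.2.1 (by omega), this.2.2.1, this.2.2.2⟩
    · rw [bsLoop]
      simp only [hlh, dite_false]
      have he : lo = hi := by omega
      subst he
      exact ⟨le_rfl, le_rfl, hlo, hhi⟩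

-- a position r with p true strictly below it and false from it on is countP p
lemma countP_eq_of_split (l : List String) (p : String → Bool) (r : Nat) (hr : r ≤ l.length)
    (h1 : ∀ i (h : i < l.length), i < r → p l[i] = true)
    (h2 : ∀ i (h : i < l.length), r ≤ i → p l[i] = false) :
    l.countP p = r := by
  conv_lhs => rw [← List.take_append_drop r l]
  rw [List.countP_append]
  have ht : (l.take r).countP p = (l.take r).length := by
    rw [List.countP_eq_length]
    intro a ha
    obtain ⟨i, hi, rfl⟩ := List.mem_iff_getElem.mp ha
    have hi' : i < r ∧ i < l.length := by
      simpa [List.length_take] using hi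
    rw [List.getElem_take]
    exact h1 i hi'.2 hi'.1
  have hd : (l.drop r).countP p = 0 := by
    rw [List.countP_eq_zero]
    intro a ha
    obtain ⟨i, hi, rfl⟩ := List.mem_iff_getElem.mp ha
    have hi' : r + i < l.length := by
      simp [List.length_drop] at hi; omega
    rw [List.getElem_drop]
    simp [h2 (r + i) hi' (by omega)]
  rw [ht, hd, List.length_take]
  omega

-- on a list where p is downward closed along indices, the binary search over [0, len) counts p
lemma bsearch_countP (l : List String) (k : String) (strict : Bool) (p : String → Bool)
    (hp : ∀ x, (decide (x < k) || (!strict && (x == k))) = p x)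
    (hmono : ∀ i j (hi : i < l.length) (hj : j < l.length), i ≤ j → p l[j] = true → p l[i] = true) :
    bsearch l k strict = l.countP p := by
  obtain ⟨hlo, hhi, hb1, hb2⟩ := bsLoop_inv l k strict p hp l.length 0 l.length
    (by omega) (by omega) le_rfl (Or.inl rfl) (Or.inl rfl)
  unfold bsearch
  symm
  apply countP_eq_of_split l p (bsLoop l k strict 0 l.length) hhi
  · intro i h hir
    rcases hb1 with h0 | ⟨hh, hpr⟩
    · omega
    · exact hmono i (bsLoop l k strict 0 l.length - 1) h hh (by omega) hpr
  · intro i h hri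
    rcases hb2 with hlen | ⟨hh, hpf⟩
    · omega
    · cases hq : p l[i] with
      | false => rfl
      | true => exact absurd (hmono (bsLoop l k strict 0 l.length) i hh h hri hq) (by simp [hpf])

-- countP (< k or == k) splits into countP (< k) plus the occurrence count of k
lemma countP_or_split (l : List String) (k : String) :
    l.countP (fun x => decide (x < k) || (x == k))
      = l.countP (fun x => decide (x < k)) + l.count k := by
  rw [List.count_eq_countP]
  induction l with
  | nil => rfl
  | cons a t ih =>
    simp only [List.countP_cons, ih]
    by_cases h : a = k
    · subst h; simp; omega
    · by_cases h2 : a < k <;> simp [h, h2]; omega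

-- along a ≤-sorted list, getElem is monotone (including equal indices)
lemma sorted_getElem_le (l : List String) (hpair : l.Pairwise (· ≤ ·))
    (i j : Nat) (hi : i < l.length) (hj : j < l.length) (hij : i ≤ j) : l[i] ≤ l[j] := by
  rcases Nat.lt_or_ge i j with h | h
  · exact List.pairwise_iff_getElem.mp hpair i j hi hj h
  · have : i = j := by omega
    subst this; exact le_rfl

-- ===== VERDICT (by name: the statement is the Claim_ definition above) =====
theorem countSentences_spec : Claim_equal_countSentences := by
  intro wordSet sentences _
  unfold Spec_countSentences countSentences countSentences_alt
  simp only [dict_eq_counter]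
  apply PySem.List.foldl_congr_mem
  intro res sent _
  congr 2
  apply PySem.List.foldl_congr_mem
  intro acc word _
  have hperm := PySem.List.sorted_perm (wordSet.map pySig) (fun s => s) false
  have hpair : (PySem.List.sorted (wordSet.map pySig) (fun s => s) false).Pairwise (· ≤ ·) :=
    PySem.List.sorted_pairwise (wordSet.map pySig) (fun s => s)
  set sigs := PySem.List.sorted (wordSet.map pySig) (fun s => s) false with hsigs
  have hT : bsearch sigs (pySig word) true = sigs.countP (fun x => decide (x < pySig word)) := by
    apply bsearch_countP sigs (pySig word) true _ (by intro x; simp)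
    intro i j hi hj hij hpj
    have hle := sorted_getElem_le sigs hpair i j hi hj hij
    have : sigs[j] < pySig word := of_decide_eq_true hpj
    exact decide_eq_true (lt_of_le_of_lt hle this)
  have hF : bsearch sigs (pySig word) false = sigs.countP (fun x => decide (x < pySig word) || (x == pySig word)) := by
    apply bsearch_countP sigs (pySig word) false _ (by intro x; simp)
    intro i j hi hj hij hpj
    have hle := sorted_getElem_le sigs hpair i j hi hj hij
    have hjk : sigs[j] ≤ pySig word := by
      rcases Bool.or_eq_true_iff.mp hpj with h | h
      · exact le_of_lt (of_decide_eq_true h)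
      · exact le_of_eq (by simpa using h)
    have hik : sigs[i] ≤ pySig word := le_trans hle hjk
    rcases lt_or_eq_of_le hik with h | h
    · simp [h]
    · simp [h]
  have hm : (bsearch sigs (pySig word) false : Int) - (bsearch sigs (pySig word) true : Int)
      = ((wordSet.map pySig).count (pySig word) : Int) := by
    rw [hT, hF, countP_or_split, hperm.count_eq (pySig word)]
    push_cast
    ring
  simp only [← pySig_eq_pySortStr]
  rw [hm]
  simp only [PySem.Dict.getD_counter, PySem.Dict.contains_counter]
  simp [List.count_pos_iff]
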